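-- pv_equiv track=rewrite | github.com/italyfiori/cnlp | cnlp/util/corpus.py | states2segments
-- ===== SOURCE A (Python) =====
-- def states2segments(states, text):
--     assert len(set(states).intersection(set(['B', 'E', 'M', 'S']))) == len(set(states))
--
--     text = list(text)
--     segments = []
--
--     start_pos = 0
--     for i in range(len(states)):
--         state = states[i]
--         if state in ['E', 'S']:
--             word = text[start_pos: i + 1]
--             segments.append(''.join(word))
--             start_pos = i + 1
--
--     if start_pos < len(states):
--         segments.append(''.join(text[start_pos:]))
--     return segments
-- ===== SOURCE B (Python) =====
-- def states2segments(states, text):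
--     assert len(set(states).intersection(set(['B', 'E', 'M', 'S']))) == len(set(states))
--     ends = [i + 1 for i, s in enumerate(states) if s in ('E', 'S')]
--     starts = [0] + ends
--     segments = [text[a:b] for a, b in zip(starts, ends)]
--     last = ends[-1] if ends else 0
--     if last < len(states):
--         segments.append(text[last:])
--     return segments
-- ===== Notes on version B (the rewrite author's own statement) =====
-- stated objective: alternative
-- what changed: Replaces A's single stateful loop (carrying start_pos and appending as it scans) by a two-phase decomposition: first compute the list of cut positions 'ends' with a comprehension, then build all segments at once by slicing text between consecutive cuts (zip of starts and ends), with the trailing remainder handled from ends[-1].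
import Mathlib
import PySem

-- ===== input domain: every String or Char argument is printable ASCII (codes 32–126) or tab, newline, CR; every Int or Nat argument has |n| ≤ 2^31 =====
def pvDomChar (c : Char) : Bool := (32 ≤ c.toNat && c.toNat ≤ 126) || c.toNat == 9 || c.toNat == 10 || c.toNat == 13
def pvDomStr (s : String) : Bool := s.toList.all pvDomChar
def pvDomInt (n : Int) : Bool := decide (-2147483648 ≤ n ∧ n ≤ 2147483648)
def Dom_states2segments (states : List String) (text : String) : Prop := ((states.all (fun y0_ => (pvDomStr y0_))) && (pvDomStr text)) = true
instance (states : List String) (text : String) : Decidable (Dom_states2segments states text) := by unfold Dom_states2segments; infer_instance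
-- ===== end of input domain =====

-- B replaces A's single stateful loop by a two-phase decomposition (compute cut
-- positions, then slice between consecutive cuts); same cost, different structure.

-- ===== PORT A =====
-- A's loop: for i in range(len(states)), state = states[i] — ported as a fold over enumerate(states)
def states2segments (states : List String) (text : String) : List String :=
  let textL := text.toList
  let r := (PySem.List.enumerate states 0).foldl
    (fun (acc : List String × Int) p =>
      if p.2 = "E" ∨ p.2 = "S" then
        (acc.1 ++ [String.ofList (PySem.List.slice textL (some acc.2) (some (p.1 + 1)))], p.1 + 1)
      else acc) ([], 0)
  if r.2 < (states.length : Int) then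
    r.1 ++ [String.ofList (PySem.List.slice textL (some r.2) none)]
  else r.1

-- ===== PORT B =====
def states2segments_alt (states : List String) (text : String) : List String :=
  let ends := (PySem.List.enumerate states 0).filterMap
    (fun p => if p.2 = "E" ∨ p.2 = "S" then some (p.1 + 1) else none)
  let starts : List Int := 0 :: ends
  let segs := (starts.zip ends).map
    (fun ab => String.ofList (PySem.List.slice text.toList (some ab.1) (some ab.2)))
  let last := ends.getLast?.getD 0
  if last < (states.length : Int) then
    segs ++ [String.ofList (PySem.List.slice text.toList (some last) none)]
  else segs

-- ===== PRECONDITION & SPEC =====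
-- Pre_ excludes exactly the inputs where A's assert fails (AssertionError): some state not in {B,E,M,S}
def Pre_states2segments (states : List String) (text : String) : Prop :=
  ∀ s ∈ states, s = "B" ∨ s = "E" ∨ s = "M" ∨ s = "S"
instance (states : List String) (text : String) : Decidable (Pre_states2segments states text) := by
  unfold Pre_states2segments; infer_instance
def pvWitness_states2segments : List String × String := (["B", "E", "S"], "abc")
def Spec_states2segments (states : List String) (text : String) (out : List String) : Prop := out = states2segments_alt states text
instance (states : List String) (text : String) (out : List String) : Decidable (Spec_states2segments states text out) := by unfold Spec_states2segments; infer_instance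

-- ===== CLAIM (what is proved, stated in full; the proofs are below) =====
def Claim_equal_states2segments : Prop := ∀ (states : List String) (text : String), Dom_states2segments states text → Pre_states2segments states text → Spec_states2segments states text (states2segments states text)

-- ===== LEMMAS AND PROOFS =====
theorem getLast?_getD_cons {α : Type} (l : List α) :
    ∀ (d a : α), ((a :: l).getLast?.getD d) = l.getLast?.getD a := by
  induction l with
  | nil => intro d a; rfl
  | cons b l ih => intro d a; rw [List.getLast?_cons_cons, ih d b, ih a b]

theorem loop_eq (textL : List Char) (states : List String) :
    ∀ (i sp : Int) (acc : List String),
    (PySem.List.enumerate states i).foldl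
      (fun (acc : List String × Int) p =>
        if p.2 = "E" ∨ p.2 = "S" then
          (acc.1 ++ [String.ofList (PySem.List.slice textL (some acc.2) (some (p.1 + 1)))], p.1 + 1)
        else acc) (acc, sp)
    = (acc ++ ((sp :: ((PySem.List.enumerate states i).filterMap
          (fun p => if p.2 = "E" ∨ p.2 = "S" then some (p.1 + 1) else none))).zip
          ((PySem.List.enumerate states i).filterMap
          (fun p => if p.2 = "E" ∨ p.2 = "S" then some (p.1 + 1) else none))).map
          (fun ab => String.ofList (PySem.List.slice textL (some ab.1) (some ab.2))),
       ((PySem.List.enumerate states i).filterMap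
          (fun p => if p.2 = "E" ∨ p.2 = "S" then some (p.1 + 1) else none)).getLast?.getD sp) := by
  induction states with
  | nil => intro i sp acc; simp [PySem.List.enumerate_nil]
  | cons s rest ih =>
    intro i sp acc
    rw [PySem.List.enumerate_cons]
    by_cases h : s = "E" ∨ s = "S"
    · simp only [List.foldl_cons, List.filterMap_cons, if_pos h]
      rw [ih (i + 1) (i + 1)]
      simp [getLast?_getD_cons]
    · simp only [List.foldl_cons, List.filterMap_cons, if_neg h]
      exact ih (i + 1) sp acc

-- ===== VERDICT (by name: the statement is the Claim_ definition above) =====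
theorem states2segments_spec : Claim_equal_states2segments := by
  intro states text _ _
  show states2segments states text = states2segments_alt states text
  unfold states2segments states2segments_alt
  simp only [loop_eq]
  simp
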